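-- pv_equiv track=rewrite | github.com/jbmilgrom/practical-algorithms-and-data-structures | misc/slot_machine/method.py | minimum_wheel_construction
-- ===== SOURCE A (Python) =====
-- def minimum_wheel_construction(grid):
--     grid_maximums = [0] * len(grid[0])
--
--     for row in grid:
--         candidate = list(row)
--         candidate.sort()
--
--         for j, digit in enumerate(candidate):
--             grid_maximums[j] = max(grid_maximums[j], int(digit))
--
--     return sum(grid_maximums)
-- ===== SOURCE B (Python) =====
-- def minimum_wheel_construction(grid):
--     width = len(grid[0])
--     items = sorted(((x, i) for i, row in enumerate(grid) for x in row),
--                    key=lambda t: t[0], reverse=True)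
--     nxt = [len(row) for row in grid]
--     seen = [False] * width
--     total = 0
--     for x, i in items:
--         nxt[i] -= 1
--         j = nxt[i]
--         if not seen[j]:
--             seen[j] = True
--             if x > 0:
--                 total += x
--     return total
-- ===== Notes on version B (the rewrite author's own statement) =====
-- stated objective: alternative
-- what changed: B never sorts rows or keeps per-column running maxima: it sorts ALL grid values once in descending order and sweeps them, assigning each value to its row's rightmost unfilled slot; the first value to land in a column is that column's maximum, so B sums exactly those first arrivals (clamped at 0).
import Mathlib
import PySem

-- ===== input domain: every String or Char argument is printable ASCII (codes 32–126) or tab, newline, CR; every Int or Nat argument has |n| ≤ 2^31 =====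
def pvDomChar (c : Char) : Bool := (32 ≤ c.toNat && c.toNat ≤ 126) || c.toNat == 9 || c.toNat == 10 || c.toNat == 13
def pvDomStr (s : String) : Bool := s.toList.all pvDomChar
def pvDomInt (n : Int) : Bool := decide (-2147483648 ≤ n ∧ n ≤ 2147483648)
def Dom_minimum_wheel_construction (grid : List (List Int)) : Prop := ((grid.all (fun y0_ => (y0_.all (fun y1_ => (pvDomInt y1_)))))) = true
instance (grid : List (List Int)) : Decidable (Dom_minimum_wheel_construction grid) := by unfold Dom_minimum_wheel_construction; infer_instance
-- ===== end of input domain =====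

-- B replaces A's per-row sorting plus running per-column maxima by ONE global descending
-- sort of all grid values swept once, assigning each value to its row's rightmost unfilled
-- slot; the first value landing in a column is that column's maximum. Alternative structure,
-- similar cost; proved equal on Pre_ (nonempty grid, no row wider than row 0).

-- ===== PORT A =====
-- inner loop: for j, digit in enumerate(candidate): grid_maximums[j] = max(grid_maximums[j], int(digit))
def pvAStep (gm : List Int) (cand : List Int) : List Int :=
  (PySem.List.enumerate cand 0).foldl
    (fun gm jd => PySem.List.pySetD gm jd.1 (max (PySem.List.pyGetD gm jd.1 0) jd.2)) gm

def minimum_wheel_construction (grid : List (List Int)) : Int :=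
  let grid_maximums := List.replicate (grid.headD []).length (0 : Int)
  let final := grid.foldl (fun gm row => pvAStep gm (PySem.List.sorted row (fun x => x) false)) grid_maximums
  final.sum

-- ===== PORT B =====
-- loop body: nxt[i] -= 1; j = nxt[i]; if not seen[j]: seen[j] = True; if x > 0: total += x
-- (the seen[j] read/write is exact under Pre_, where j is always in range)
def pvBStep (st : List Int × List Bool × Int) (it : Int × Int) : List Int × List Bool × Int :=
  let nxt := PySem.List.pySetD st.1 it.2 (PySem.List.pyGetD st.1 it.2 0 - 1)
  let j := PySem.List.pyGetD nxt it.2 0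
  if PySem.List.pyGetD st.2.1 j false = false then
    (nxt, PySem.List.pySetD st.2.1 j true, if it.1 > 0 then st.2.2 + it.1 else st.2.2)
  else (nxt, st.2.1, st.2.2)

def minimum_wheel_construction_alt (grid : List (List Int)) : Int :=
  let width := (grid.headD []).length
  let items := PySem.List.sorted
    ((PySem.List.enumerate grid 0).flatMap (fun ir => ir.2.map (fun x => (x, ir.1))))
    (fun t => t.1) true
  (items.foldl pvBStep (grid.map (fun r => (r.length : Int)), List.replicate width false, 0)).2.2

-- ===== PRECONDITION & SPEC =====
-- A raises IndexError on an empty grid (grid[0]) and when some row is longer than row 0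
-- (assignment to grid_maximums[j] out of range); exactly those inputs are excluded.
def Pre_minimum_wheel_construction (grid : List (List Int)) : Prop :=
  grid ≠ [] ∧ ∀ row ∈ grid, row.length ≤ (grid.headD []).length
instance (grid : List (List Int)) : Decidable (Pre_minimum_wheel_construction grid) := by unfold Pre_minimum_wheel_construction; infer_instance

def pvWitness_minimum_wheel_construction : List (List Int) := [[1, 2], [3, 0]]

def Spec_minimum_wheel_construction (grid : List (List Int)) (out : Int) : Prop := out = minimum_wheel_construction_alt grid
instance (grid : List (List Int)) (out : Int) : Decidable (Spec_minimum_wheel_construction grid out) := by unfold Spec_minimum_wheel_construction; infer_instance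

-- ===== CLAIM (what is proved, stated in full; the proofs are below) =====
def Claim_equal_minimum_wheel_construction : Prop := ∀ (grid : List (List Int)), Dom_minimum_wheel_construction grid → Pre_minimum_wheel_construction grid → Spec_minimum_wheel_construction grid (minimum_wheel_construction grid)

-- ===== LEMMAS AND PROOFS =====

-- ---- common spec: per-column maxima over sorted rows with a remaining-count per row ----
def pvColMaxP (ps : List (List Int × Nat)) (j : Nat) : Int :=
  ps.foldl (fun m p => if j < p.2 then max m (p.1.getD j 0) else m) 0

def pvSpecSum (ps : List (List Int × Nat)) (seen : List Bool) : Int :=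
  ((List.range seen.length).map (fun j => if seen.getD j false then 0 else pvColMaxP ps j)).sum

-- ---- A-side lemmas ----

theorem pvAStep_length (gm cand : List Int) : (pvAStep gm cand).length = gm.length := by
  unfold pvAStep
  generalize PySem.List.enumerate cand 0 = ps
  induction ps generalizing gm with
  | nil => rfl
  | cons p ps ih => simp [List.foldl_cons, ih, PySem.List.length_pySetD]

theorem pvAStep_getD (cand : List Int) (gm : List Int) (s j : Nat)
    (hlen : s + cand.length ≤ gm.length) :
    ((PySem.List.enumerate cand (s : Int)).foldl
      (fun gm jd => PySem.List.pySetD gm jd.1 (max (PySem.List.pyGetD gm jd.1 0) jd.2)) gm).getD j 0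
    = if s ≤ j ∧ j < s + cand.length then max (gm.getD j 0) (cand.getD (j - s) 0) else gm.getD j 0 := by
  induction cand generalizing gm s with
  | nil =>
    simp only [PySem.List.enumerate_nil, List.foldl_nil]
    rw [if_neg (by simp only [List.length_nil]; omega)]
  | cons x xs ih =>
    rw [PySem.List.enumerate_cons]
    simp only [List.foldl_cons]
    have hcast : ((s : Int) + 1) = ((s + 1 : Nat) : Int) := by push_cast; ring
    rw [hcast, ih (PySem.List.pySetD gm (s : Int) (max (PySem.List.pyGetD gm (s : Int) 0) x))
      (s + 1) (by rw [PySem.List.length_pySetD]; simp only [List.length_cons] at hlen; omega)]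
    have hset : PySem.List.pySetD gm (s : Int) (max (PySem.List.pyGetD gm (s : Int) 0) x)
        = gm.set s (max (gm.getD s 0) x) := by
      simp [PySem.List.pySetD_natCast, PySem.List.pyGetD_natCast]
    rw [hset]
    have hslt : s < gm.length := by simp at hlen; omega
    by_cases h1 : s + 1 ≤ j ∧ j < s + 1 + xs.length
    · simp only [if_pos h1]
      have hjne : j ≠ s := by omega
      have hjlt : j < gm.length := by simp at hlen; omega
      have hgd : (gm.set s (max (gm.getD s 0) x)).getD j 0 = gm.getD j 0 := by
        simp [List.getD, hjne.symm]
      rw [hgd, if_pos (show s ≤ j ∧ j < s + (x :: xs).length by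
        simp only [List.length_cons]; omega)]
      rw [show j - s = (j - (s+1)) + 1 by omega]
      simp
    · simp only [if_neg h1]
      by_cases h2 : j = s
      · subst h2
        have : (gm.set j (max (gm.getD j 0) x)).getD j 0 = max (gm.getD j 0) x := by
          simp [List.getD, hslt]
        rw [this, if_pos (show j ≤ j ∧ j < j + (x :: xs).length by
          simp only [List.length_cons]; omega)]
        simp
      · have : (gm.set s (max (gm.getD s 0) x)).getD j 0 = gm.getD j 0 := by
          simp [List.getD, Ne.symm h2]
        rw [this]
        rw [if_neg (show ¬(s ≤ j ∧ j < s + (x :: xs).length) by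
          simp only [List.length_cons] at h1 ⊢; omega)]

theorem pv_fold_getD (grid : List (List Int)) (W : Nat)
    (hrows : ∀ row ∈ grid, row.length ≤ W)
    (gm : List Int) (hgm : gm.length = W) (j : Nat) :
    (grid.foldl (fun gm row => pvAStep gm (PySem.List.sorted row (fun x => x) false)) gm).getD j 0
    = (grid.map (fun r => PySem.List.sorted r (fun x => x) false)).foldl
        (fun m row => if j < row.length then max m (row.getD j 0) else m) (gm.getD j 0) := by
  induction grid generalizing gm with
  | nil => rfl
  | cons r rs ih =>
    simp only [List.foldl_cons, List.map_cons]
    set c := PySem.List.sorted r (fun x => x) false with hc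
    have hclen : c.length = r.length := PySem.List.length_sorted r _ _
    have hle : c.length ≤ gm.length := by rw [hclen, hgm]; exact hrows r (List.mem_cons_self ..)
    have hstep : (pvAStep gm c).getD j 0
        = if j < c.length then max (gm.getD j 0) (c.getD j 0) else gm.getD j 0 := by
      have := pvAStep_getD c gm 0 j (by omega)
      simpa [pvAStep, Nat.zero_add] using this
    rw [ih (fun row hr => hrows row (List.mem_cons_of_mem _ hr)) (pvAStep gm c)
      (by rw [pvAStep_length, hgm]), hstep]

theorem pv_sum_eq_range (xs : List Int) :
    xs.sum = ((List.range xs.length).map (fun j => xs.getD j 0)).sum := by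
  congr 1
  apply List.ext_getElem
  · simp
  · intro i h1 h2
    simp [List.getD, List.getElem?_eq_getElem h1]

-- ---- generic fold-max lemmas ----

theorem pvFold_init_le (l : List (List Int × Nat)) (j : Nat) (a : Int) :
    a ≤ l.foldl (fun m p => if j < p.2 then max m (p.1.getD j 0) else m) a := by
  induction l generalizing a with
  | nil => simp
  | cons p l ih =>
    simp only [List.foldl_cons]
    refine le_trans ?_ (ih _)
    split_ifs <;> simp

theorem pvFold_mem_le (l : List (List Int × Nat)) (j : Nat)
    (q : List Int × Nat) (hq : q ∈ l) (hj : j < q.2) :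
    ∀ a : Int, q.1.getD j 0 ≤ l.foldl (fun m p => if j < p.2 then max m (p.1.getD j 0) else m) a := by
  induction l with
  | nil => cases hq
  | cons p l ih =>
    intro a
    simp only [List.foldl_cons]
    rcases List.mem_cons.mp hq with h | h
    · subst h
      refine le_trans ?_ (pvFold_init_le l j _)
      rw [if_pos hj]; simp
    · exact ih h _

theorem pvFold_le_bound (l : List (List Int × Nat)) (j : Nat) (x : Int)
    (h : ∀ p ∈ l, j < p.2 → p.1.getD j 0 ≤ x) :
    ∀ a : Int, a ≤ max 0 x →
      l.foldl (fun m p => if j < p.2 then max m (p.1.getD j 0) else m) a ≤ max 0 x := by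
  induction l with
  | nil => intro a ha; simpa using ha
  | cons p l ih =>
    intro a ha
    simp only [List.foldl_cons]
    refine ih (fun q hq hj => h q (List.mem_cons_of_mem _ hq) hj) _ ?_
    split_ifs with hc
    · exact max_le ha (le_trans (h p (List.mem_cons_self ..) hc) (le_max_right _ _))
    · exact ha

theorem pvFold_set (ps : List (List Int × Nat)) (k : Nat) (q : List Int × Nat)
    (j : Nat) (a : Int)
    (h : ∀ (hk : k < ps.length), q.1 = ps[k].1 ∧ ((j < q.2) ↔ (j < ps[k].2))) :
    (ps.set k q).foldl (fun m p => if j < p.2 then max m (p.1.getD j 0) else m) a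
    = ps.foldl (fun m p => if j < p.2 then max m (p.1.getD j 0) else m) a := by
  induction ps generalizing k a with
  | nil => simp
  | cons p ps ih =>
    cases k with
    | zero =>
      obtain ⟨h1, h2⟩ := h (by simp)
      simp only [List.set_cons_zero, List.foldl_cons]
      congr 1
      simp only [List.getElem_cons_zero] at h1 h2
      by_cases hj : j < p.2
      · rw [if_pos (h2.mpr hj), if_pos hj, h1]
      · rw [if_neg (fun hc => hj (h2.mp hc)), if_neg hj]
    | succ k =>
      simp only [List.set_cons_succ, List.foldl_cons]
      exact ih k _ (fun hk => h (by simpa using Nat.succ_lt_succ hk))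

theorem pvColMaxP_zero (ps : List (List Int × Nat)) (j : Nat)
    (h : ∀ p ∈ ps, p.2 = 0) : pvColMaxP ps j = 0 := by
  unfold pvColMaxP
  induction ps with
  | nil => rfl
  | cons p l ih =>
    simp only [List.foldl_cons]
    rw [if_neg (by rw [h p (List.mem_cons_self ..)]; omega)]
    exact ih (fun q hq => h q (List.mem_cons_of_mem _ hq))

theorem pv_sum_update (W jn : Nat) (hj : jn < W) (f g : Nat → Int)
    (h : ∀ j, j ≠ jn → f j = g j) :
    ((List.range W).map f).sum = ((List.range W).map g).sum + (f jn - g jn) := by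
  induction W with
  | zero => omega
  | succ m ih =>
    rw [List.range_succ]
    simp only [List.map_append, List.sum_append, List.map_cons, List.map_nil,
      List.sum_cons, List.sum_nil]
    by_cases hm : jn = m
    · subst hm
      have : (List.range jn).map f = (List.range jn).map g := by
        apply List.map_congr_left
        intro j hjm
        exact h j (by have := List.mem_range.mp hjm; omega)
      rw [this]; ring
    · rw [ih (by omega), h m (Ne.symm hm)]; ring

-- ---- the sorted flattened items, filtered per row ----

theorem pv_filter_flat (g : List (List Int)) (s k : Int) :
    ((((PySem.List.enumerate g s).flatMap (fun ir => ir.2.map (fun x => (x, ir.1)))).filter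
        (fun t => t.2 == k)).map Prod.fst)
    = if s ≤ k ∧ k < s + g.length then g.getD (k - s).toNat [] else [] := by
  induction g generalizing s with
  | nil =>
    simp only [PySem.List.enumerate_nil, List.flatMap_nil, List.filter_nil, List.map_nil]
    rw [if_neg (by rintro ⟨h1, h2⟩; simp only [List.length_nil, Int.natCast_zero, add_zero] at h2; omega)]
  | cons r g ih =>
    rw [PySem.List.enumerate_cons]
    simp only [List.flatMap_cons, List.filter_append, List.map_append]
    rw [ih (s + 1)]
    by_cases hk : s = k
    · subst hk
      have h1 : (r.map (fun x => (x, s))).filter (fun t => t.2 == s) = r.map (fun x => (x, s)) := by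
        apply List.filter_eq_self.mpr
        intro a ha
        obtain ⟨x, _, rfl⟩ := List.mem_map.mp ha
        simp
      rw [h1, if_neg (by omega), if_pos (by simp only [List.length_cons]; push_cast; omega)]
      simp only [List.append_nil, List.map_map, sub_self, Int.toNat_zero, List.getD_cons_zero]
      have hcomp : (Prod.fst ∘ fun x : Int => (x, s)) = id := rfl
      rw [hcomp, List.map_id]
    · have h1 : (r.map (fun x => (x, s))).filter (fun t => t.2 == k) = [] := by
        apply List.filter_eq_nil_iff.mpr
        intro a ha
        obtain ⟨x, _, rfl⟩ := List.mem_map.mp ha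
        simp [hk]
      rw [h1]
      simp only [List.map_nil, List.nil_append, List.length_cons]
      by_cases h2 : s + 1 ≤ k ∧ k < s + 1 + (g.length : Int)
      · rw [if_pos h2, if_pos (by push_cast; omega)]
        have h3 : (k - s).toNat = (k - (s + 1)).toNat + 1 := by omega
        rw [h3]
        simp [List.getD]
      · rw [if_neg h2, if_neg (by push_cast at h2 ⊢; omega)]

-- ---- the main sweep invariant ----

theorem pvB_main (L : List (Int × Int)) (ps : List (List Int × Nat)) (seen : List Bool) (total : Int)
    (hidx : ∀ t ∈ L, 0 ≤ t.2 ∧ t.2 < (ps.length : Int))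
    (hsorted : L.Pairwise (fun a b => b.1 ≤ a.1))
    (hrow : ∀ k, k < ps.length →
      ((L.filter (fun t => t.2 == (k : Int))).map Prod.fst)
        = ((ps.getD k ([], 0)).1.take (ps.getD k ([], 0)).2).reverse)
    (hn : ∀ p ∈ ps, p.2 ≤ p.1.length)
    (hW : ∀ p ∈ ps, p.2 ≤ seen.length) :
    (L.foldl pvBStep (ps.map (fun p => ((p.2 : Int))), seen, total)).2.2
      = total + pvSpecSum ps seen := by
  induction L generalizing ps seen total with
  | nil =>
    simp only [List.foldl_nil]
    have hz : pvSpecSum ps seen = 0 := by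
      unfold pvSpecSum
      apply List.sum_eq_zero
      intro y hy
      obtain ⟨j, _, rfl⟩ := List.mem_map.mp hy
      split_ifs with hs
      · rfl
      · apply pvColMaxP_zero
        intro p hp
        obtain ⟨k, hk, rfl⟩ := List.mem_iff_getElem.mp hp
        have := hrow k hk
        simp only [List.filter_nil, List.map_nil] at this
        rw [List.getD_eq_getElem ps ([], 0) hk] at this
        have htake := (List.reverse_eq_nil_iff).mp this.symm
        rcases List.take_eq_nil_iff.mp htake with h | h
        · exact h
        · have := hn ps[k] (List.getElem_mem hk)
          rw [h] at this
          simpa using this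
    rw [hz]; ring
  | cons t L ihL =>
    obtain ⟨x, i⟩ := t
    have hidx0 := hidx (x, i) (List.mem_cons_self ..)
    simp only at hidx0
    set k := i.toNat with hkdef
    have hik : i = (k : Int) := (Int.toNat_of_nonneg hidx0.1).symm
    have hkps : k < ps.length := by omega
    rcases hps : ps[k]'hkps with ⟨pr, pn⟩
    have hpmem : (pr, pn) ∈ ps := hps ▸ List.getElem_mem hkps
    have hrk := hrow k hkps
    rw [List.getD_eq_getElem ps ([], 0) hkps, hps] at hrk
    rw [List.filter_cons_of_pos (by simp [hik])] at hrk
    simp only [List.map_cons] at hrk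
    -- pn ≥ 1, x is the largest remaining of row k
    have hpn : 0 < pn := by
      by_contra h
      have h0 : pn = 0 := by omega
      rw [h0] at hrk
      simp at hrk
    have hnp : pn ≤ pr.length := by
      have := hn (pr, pn) hpmem
      simpa using this
    set jn := pn - 1 with hjndef
    have htake : pr.take pn = pr.take jn ++ [pr.getD jn 0] := by
      have h1 : pn = jn + 1 := by omega
      rw [h1, List.take_add_one, List.getElem?_eq_getElem (by omega : jn < pr.length),
        List.getD_eq_getElem _ _ (by omega : jn < pr.length)]
      rfl
    rw [htake] at hrk
    simp only [List.reverse_append, List.reverse_cons, List.reverse_nil,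
      List.nil_append, List.cons_append, List.cons.injEq] at hrk
    obtain ⟨hx, hLk⟩ := hrk
    -- compute the step
    have hjn_int : ((pn : Int)) - 1 = ((jn : Nat) : Int) := by omega
    have hgetnxt : PySem.List.pyGetD (ps.map (fun p => ((p.2 : Int)))) i 0 = (pn : Int) := by
      rw [hik, PySem.List.pyGetD_natCast]
      rw [List.getD_eq_getElem _ 0 (by simpa using hkps)]
      rw [List.getElem_map, hps]
    set ps' := ps.set k (pr, jn) with hps'def
    have hnxt' : PySem.List.pySetD (ps.map (fun p => ((p.2 : Int)))) i
        (PySem.List.pyGetD (ps.map (fun p => ((p.2 : Int)))) i 0 - 1)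
        = ps'.map (fun p => ((p.2 : Int))) := by
      rw [hgetnxt, hik, PySem.List.pySetD_natCast, hps'def, List.map_set, hjn_int]
    have hgetj : PySem.List.pyGetD (ps'.map (fun p => ((p.2 : Int)))) i 0 = ((jn : Nat) : Int) := by
      rw [hik, PySem.List.pyGetD_natCast]
      rw [List.getD_eq_getElem _ 0 (by simpa [hps'def] using hkps)]
      simp [hps'def]
    have hseen_get : PySem.List.pyGetD seen ((jn : Nat) : Int) false = seen.getD jn false := by
      rw [PySem.List.pyGetD_natCast]
    -- hypotheses for the tail
    have hidx' : ∀ t ∈ L, 0 ≤ t.2 ∧ t.2 < ((ps'.length : Nat) : Int) := by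
      intro t ht
      have := hidx t (List.mem_cons_of_mem _ ht)
      simpa [hps'def] using this
    have hsorted' : L.Pairwise (fun a b => b.1 ≤ a.1) := hsorted.of_cons
    have hhead : ∀ b ∈ L, b.1 ≤ x := (List.pairwise_cons.mp hsorted).1
    have hrow' : ∀ k', k' < ps'.length →
        ((L.filter (fun t => t.2 == (k' : Int))).map Prod.fst)
          = ((ps'.getD k' ([], 0)).1.take (ps'.getD k' ([], 0)).2).reverse := by
      intro k' hk'
      have hk'ps : k' < ps.length := by simpa [hps'def] using hk'
      by_cases hkk : k' = k
      · rw [hkk]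
        have hgd : ps'.getD k ([], 0) = (pr, jn) := by
          rw [hps'def, List.getD_eq_getElem _ _ (by simpa using hkps)]
          simp
        rw [hgd]
        exact hLk
      · have hps'k : ps'.getD k' ([], 0) = ps.getD k' ([], 0) := by
          rw [hps'def, List.getD_eq_getElem _ _ (by simpa using hk'ps),
            List.getD_eq_getElem _ _ hk'ps]
          rw [List.getElem_set_ne (by omega)]
        rw [hps'k]
        have := hrow k' hk'ps
        rw [List.filter_cons_of_neg (by simp [hik]; omega)] at this
        exact this
    have hn' : ∀ q ∈ ps', q.2 ≤ q.1.length := by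
      intro q hq
      rcases List.mem_or_eq_of_mem_set hq with h | h
      · exact hn q h
      · rw [h]; simpa using by omega
    -- every value still in L that covers column jn is ≤ x; p covers jn with value x
    have hcover_le : ∀ q ∈ ps, jn < q.2 → q.1.getD jn 0 ≤ x := by
      intro q hq hjq
      obtain ⟨k', hk', rfl⟩ := List.mem_iff_getElem.mp hq
      have hjlen : jn < ps[k'].1.length := lt_of_lt_of_le hjq (hn _ hq)
      have hval : ps[k'].1.getD jn 0 = (ps[k'].1.take ps[k'].2)[jn]'(by
          rw [List.length_take]; omega) := by
        rw [List.getElem_take, List.getD_eq_getElem _ _ hjlen]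
      have hmemtake : ps[k'].1.getD jn 0 ∈ (ps[k'].1.take ps[k'].2).reverse := by
        rw [List.mem_reverse, hval]; exact List.getElem_mem _
      have := hrow k' hk'
      rw [List.getD_eq_getElem ps ([], 0) hk'] at this
      rw [← this] at hmemtake
      obtain ⟨q', hq', hq'1⟩ := List.mem_map.mp hmemtake
      rcases List.mem_cons.mp (List.mem_of_mem_filter hq') with h | h
      · rw [← hq'1, h]
      · rw [← hq'1]; exact hhead q' h
    have hcolmax : pvColMaxP ps jn = max 0 x := by
      apply le_antisymm
      · exact pvFold_le_bound ps jn x hcover_le 0 (le_max_left _ _)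
      · apply max_le
        · exact pvFold_init_le ps jn 0
        · rw [hx]
          exact pvFold_mem_le ps jn (pr, pn) hpmem (by omega) 0
    have hcong_set : ∀ j, j ≠ jn → pvColMaxP ps' j = pvColMaxP ps j := by
      intro j hjne
      unfold pvColMaxP
      apply pvFold_set
      intro hk
      have h2 : ps[k]'hk = (pr, pn) := hps
      rw [h2]
      exact ⟨rfl, by show (j < jn) ↔ (j < pn); omega⟩
    have hjnW : jn < seen.length :=
      lt_of_lt_of_le (by omega) ((by simpa using hW (pr, pn) hpmem : pn ≤ seen.length))
    -- one step of the fold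
    have hstep : pvBStep (ps.map (fun p => ((p.2 : Int))), seen, total) (x, i)
        = if seen.getD jn false = false
          then (ps'.map (fun p => ((p.2 : Int))), seen.set jn true,
                if x > 0 then total + x else total)
          else (ps'.map (fun p => ((p.2 : Int))), seen, total) := by
      simp only [pvBStep, hnxt', hgetj, hseen_get, PySem.List.pySetD_natCast]
    simp only [List.foldl_cons]
    rw [hstep]
    by_cases hseen : seen.getD jn false = false
    · -- column jn newly covered: its value is max 0 x
      rw [if_pos hseen]
      have hW' : ∀ q ∈ ps', q.2 ≤ (seen.set jn true).length := by
        intro q hq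
        rcases List.mem_or_eq_of_mem_set hq with h | h
        · simpa using hW q h
        · rw [h]; simp; omega
      rw [ihL ps' (seen.set jn true) _ hidx' hsorted' hrow' hn' hW']
      -- sum bookkeeping
      have hsum : pvSpecSum ps seen = pvSpecSum ps' (seen.set jn true) + max 0 x := by
        unfold pvSpecSum
        simp only [List.length_set]
        rw [pv_sum_update seen.length jn hjnW
          (fun j => if seen.getD j false then 0 else pvColMaxP ps j)
          (fun j => if (seen.set jn true).getD j false then 0 else pvColMaxP ps' j)
          (fun j hjne => by
            have hg : (seen.set jn true).getD j false = seen.getD j false := by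
              simp [List.getD, List.getElem?_set_ne (by omega : jn ≠ j)]
            simp only [hg, hcong_set j hjne])]
        have h1 : seen.getD jn false = false := hseen
        have h2 : (seen.set jn true).getD jn false = true := by
          simp [List.getD, hjnW]
        rw [h1, h2, hcolmax]
        simp
      rw [hsum]
      by_cases hxpos : x > 0
      · rw [if_pos hxpos]
        have : max 0 x = x := by omega
        rw [this]; ring
      · rw [if_neg hxpos]
        have : max 0 x = 0 := by omega
        rw [this]; ring
    · -- column jn was already counted
      rw [if_neg hseen]
      have hW' : ∀ q ∈ ps', q.2 ≤ seen.length := by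
        intro q hq
        rcases List.mem_or_eq_of_mem_set hq with h | h
        · exact hW q h
        · rw [h]; simp; exact le_trans (by omega) ((by simpa using hW (pr, pn) hpmem : pn ≤ seen.length))
      rw [ihL ps' seen _ hidx' hsorted' hrow' hn' hW']
      have hsum : pvSpecSum ps' seen = pvSpecSum ps seen := by
        unfold pvSpecSum
        congr 1
        apply List.map_congr_left
        intro j hjr
        by_cases hjne : j = jn
        · subst hjne
          have hseenT : seen.getD jn false = true := by
            cases h : seen.getD jn false with
            | false => exact absurd h hseen
            | true => rfl
          simp only [hseenT]
          simp
        · rw [hcong_set j hjne]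
      rw [hsum]

-- ===== VERDICT (by name: the statement is the Claim_ definition above) =====
theorem minimum_wheel_construction_spec : Claim_equal_minimum_wheel_construction := by
  intro grid _ hpre
  unfold Spec_minimum_wheel_construction minimum_wheel_construction minimum_wheel_construction_alt
  simp only []
  set W := (grid.headD []).length with hWdef
  set sortFn := fun r : List Int => PySem.List.sorted r (fun x => x) false with hsortFn
  set ps0 := grid.map (fun r => (sortFn r, r.length)) with hps0
  -- ---- B side ----
  set flat := (PySem.List.enumerate grid 0).flatMap (fun ir => ir.2.map (fun x => (x, ir.1))) with hflat
  set items := PySem.List.sorted flat (fun t => t.1) true with hitems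
  have hperm : items.Perm flat := PySem.List.sorted_perm flat _ _
  have hpair : items.Pairwise (fun a b => b.1 ≤ a.1) := PySem.List.sorted_pairwise_rev flat _
  have hinit : grid.map (fun r => ((r.length : Int))) = ps0.map (fun p => ((p.2 : Int))) := by
    rw [hps0, List.map_map]
    rfl
  have hidx : ∀ t ∈ items, 0 ≤ t.2 ∧ t.2 < ((ps0.length : Nat) : Int) := by
    intro t ht
    have htf : t ∈ flat := hperm.mem_iff.mp ht
    obtain ⟨ir, hir, htm⟩ := List.mem_flatMap.mp htf
    obtain ⟨x, _, rfl⟩ := List.mem_map.mp htm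
    obtain ⟨kk, hkk, rfl⟩ := (PySem.List.mem_enumerate_iff grid 0 ir).mp hir
    simp only [hps0, List.length_map, zero_add]
    exact ⟨by omega, by omega⟩
  have hrow : ∀ k, k < ps0.length →
      ((items.filter (fun t => t.2 == (k : Int))).map Prod.fst)
        = ((ps0.getD k ([], 0)).1.take (ps0.getD k ([], 0)).2).reverse := by
    intro k hk
    have hkg : k < grid.length := by simpa [hps0] using hk
    have hgetps : ps0.getD k ([], 0) = (sortFn (grid[k]'hkg), (grid[k]'hkg).length) := by
      rw [List.getD_eq_getElem _ _ hk]
      simp [hps0]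
    rw [hgetps]
    have htakeall : (sortFn (grid[k]'hkg)).take (grid[k]'hkg).length = sortFn (grid[k]'hkg) := by
      apply List.take_of_length_le
      rw [hsortFn]
      simp [PySem.List.length_sorted]
    rw [htakeall]
    -- the filtered items are a permutation of row k …
    have hfperm : ((items.filter (fun t => t.2 == (k : Int))).map Prod.fst).Perm
        ((flat.filter (fun t => t.2 == (k : Int))).map Prod.fst) :=
      (hperm.filter _).map _
    have hflatval : ((flat.filter (fun t => t.2 == (k : Int))).map Prod.fst) = grid[k]'hkg := by
      rw [hflat, pv_filter_flat grid 0 (k : Int)]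
      rw [if_pos (by constructor <;> omega)]
      simp [List.getD, List.getElem?_eq_getElem hkg]
    have hpermrow : ((items.filter (fun t => t.2 == (k : Int))).map Prod.fst).Perm
        ((sortFn (grid[k]'hkg)).reverse) := by
      refine (hfperm.trans ?_)
      rw [hflatval]
      exact ((List.reverse_perm _).trans (PySem.List.sorted_perm (grid[k]'hkg) (fun x => x) false)).symm
    -- … and both sides are sorted descending, hence equal
    have hs1 : ((items.filter (fun t => t.2 == (k : Int))).map Prod.fst).Pairwise
        (fun a b : Int => b ≤ a) := by
      refine List.Pairwise.map _ ?_ (hpair.filter _)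
      intro a b hab
      exact hab
    have hs2 : ((sortFn (grid[k]'hkg)).reverse).Pairwise (fun a b : Int => b ≤ a) := by
      rw [List.pairwise_reverse]
      have := PySem.List.sorted_pairwise (grid[k]'hkg) (fun x : Int => x)
      simpa [hsortFn] using this
    exact List.Perm.eq_of_pairwise (fun a b _ _ h1 h2 => le_antisymm h2 h1) hs1 hs2 hpermrow
  have hn : ∀ p ∈ ps0, p.2 ≤ p.1.length := by
    intro p hp
    obtain ⟨r, _, rfl⟩ := List.mem_map.mp hp
    simp [hsortFn, PySem.List.length_sorted]
  have hWb : ∀ p ∈ ps0, p.2 ≤ (List.replicate W false).length := by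
    intro p hp
    obtain ⟨r, hr, rfl⟩ := List.mem_map.mp hp
    rw [List.length_replicate]
    exact hpre.2 r hr
  have hB := pvB_main items ps0 (List.replicate W false) 0 hidx hpair hrow hn hWb
  rw [hinit, hB, zero_add]
  -- ---- A side ----
  set final := grid.foldl (fun gm row => pvAStep gm (sortFn row)) (List.replicate W (0 : Int)) with hfinal
  have hflen : final.length = W := by
    rw [hfinal]
    have : ∀ gs gm, (List.foldl (fun gm row => pvAStep gm (sortFn row)) gm gs : List Int).length = gm.length := by
      intro gs
      induction gs with
      | nil => intro gm; rfl
      | cons g gs ih => intro gm; simp only [List.foldl_cons]; rw [ih, pvAStep_length]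
    rw [this, List.length_replicate]
  rw [pv_sum_eq_range final, hflen]
  unfold pvSpecSum
  simp only [List.length_replicate]
  congr 1
  apply List.map_congr_left
  intro j hj
  have hjW : j < W := List.mem_range.mp hj
  rw [pv_fold_getD grid W hpre.2 (List.replicate W 0) (List.length_replicate) j]
  have hz : (List.replicate W (0 : Int)).getD j 0 = 0 := by simp [List.getD, hjW]
  rw [hz]
  have hrep : (List.replicate W false).getD j false = false := by simp [List.getD, hjW]
  rw [hrep, if_neg (by simp)]
  unfold pvColMaxP
  rw [hps0, List.foldl_map, List.foldl_map]
  have hfun : (fun (m : Int) (r : List Int) =>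
        if j < (sortFn r).length then max m ((sortFn r).getD j 0) else m)
      = (fun (m : Int) (r : List Int) =>
        if j < r.length then max m ((sortFn r).getD j 0) else m) := by
    funext m r
    simp [hsortFn, PySem.List.length_sorted]
  rw [← hfun]
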